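-- pv_equiv track=rewrite | github.com/santiago120600/ADN_Mutante | src/main.py | diagonales_inferiores
-- ===== SOURCE A (Python) =====
-- def checar_horizontal(matriz):
--     contador = 0
--     for fila in matriz:
--         # checar si se encuentra el patron AAAA TTTT CCCC GGGG
--         if fila.find("TTTT") != -1 or fila.find("AAAA") != -1 or fila.find("CCCC") != -1 or fila.find("GGGG") != -1:
--             contador +=1
--         else:
--             continue
--     return contador
--
-- def diagonales_inferiores(matriz):
--     diagonales = []
--     filas = len(matriz)
--     columnas = len(matriz[0])
--     for i in range(1, filas):
--         diagonal = ''
--         j = 0  # Columna inicial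
--         k = i  # Fila inicial
--         while j < columnas and k < filas:
--             diagonal += matriz[k][j]
--             j += 1
--             k += 1
--         diagonales.append(diagonal)
--     return checar_horizontal(diagonales) #['AAAATG', 'ATACT', 'AGCA', 'ACA', 'CA', 'A']
-- ===== SOURCE B (Python) =====
-- def diagonales_inferiores(matriz):
--     filas = len(matriz)
--     columnas = len(matriz[0])
--     contador = 0
--     for i in range(1, filas):
--         j = 0
--         k = i
--         prev = ''
--         run = 0
--         while j < columnas and k < filas:
--             c = matriz[k][j]
--             run = run + 1 if c == prev else 1
--             prev = c
--             if run == 4 and c in "ATCG":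
--                 contador += 1
--                 break
--             j += 1
--             k += 1
--     return contador
-- ===== Notes on version B (the rewrite author's own statement) =====
-- stated objective: faster
-- what changed: Single pass: instead of materialising each lower diagonal as a string and then running four substring searches over the list of diagonals, B walks each diagonal's cells directly, maintaining the previous character and a consecutive-run counter, counts the diagonal as soon as a run of 4 of A/T/C/G appears and stops scanning it; no intermediate strings or second phase.
import Mathlib
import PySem

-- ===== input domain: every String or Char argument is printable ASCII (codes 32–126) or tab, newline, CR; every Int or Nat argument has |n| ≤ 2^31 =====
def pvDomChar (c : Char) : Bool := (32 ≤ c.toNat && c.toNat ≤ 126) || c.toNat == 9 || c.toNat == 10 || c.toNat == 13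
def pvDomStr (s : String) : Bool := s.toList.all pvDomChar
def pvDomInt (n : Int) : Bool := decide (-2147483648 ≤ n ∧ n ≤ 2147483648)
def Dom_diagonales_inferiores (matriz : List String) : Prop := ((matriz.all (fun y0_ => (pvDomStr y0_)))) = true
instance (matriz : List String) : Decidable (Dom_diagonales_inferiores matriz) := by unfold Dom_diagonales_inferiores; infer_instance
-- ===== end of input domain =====

-- B replaces A's build-all-diagonals-then-substring-search with a direct one-pass
-- run-length scan over each lower diagonal (alternative decomposition, same results).


-- shared cell access matriz[k][j] (Python raises out of range; Pre_ excludes that, default never reached inside Pre_)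
def pvCell (matriz : List String) (k j : Nat) : Char :=
  (PySem.Str.pyGet? ((PySem.List.pyGet? matriz (k : Int)).getD "") (j : Int)).getD ' '

-- ===== PORT A =====
def checar_horizontal (matriz : List String) : Int :=
  matriz.foldl (fun contador fila =>
    if PySem.Str.find fila "TTTT" ≠ -1 ∨ PySem.Str.find fila "AAAA" ≠ -1 ∨
       PySem.Str.find fila "CCCC" ≠ -1 ∨ PySem.Str.find fila "GGGG" ≠ -1
    then contador + 1 else contador) 0

-- the 'while j < columnas and k < filas: diagonal += matriz[k][j]' loop
def buildDiag (matriz : List String) (columnas filas : Nat) (j k : Nat) (diagonal : List Char) : List Char :=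
  if j < columnas ∧ k < filas then
    buildDiag matriz columnas filas (j + 1) (k + 1) (diagonal ++ [pvCell matriz k j])
  else diagonal
termination_by columnas - j

def diagonales_inferiores (matriz : List String) : Int :=
  let filas := matriz.length
  let columnas := ((PySem.List.pyGet? matriz (0 : Int)).getD "").toList.length
  let diagonales := (PySem.List.pyRange 1 (filas : Int) 1).foldl
    (fun ds i => ds ++ [String.ofList (buildDiag matriz columnas filas 0 i.toNat [])]) []
  checar_horizontal diagonales

-- ===== PORT B =====
-- the inner while loop of B: previous char + run length, early exit at a DNA 4-run
def scanDiag (matriz : List String) (columnas filas : Nat) (j k : Nat) (prev : Option Char) (run : Nat) : Bool :=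
  if j < columnas ∧ k < filas then
    let c := pvCell matriz k j
    let run' := if some c = prev then run + 1 else 1
    if run' = 4 ∧ c ∈ (['A', 'T', 'C', 'G'] : List Char) then true
    else scanDiag matriz columnas filas (j + 1) (k + 1) (some c) run'
  else false
termination_by columnas - j

def diagonales_inferiores_alt (matriz : List String) : Int :=
  let filas := matriz.length
  let columnas := ((PySem.List.pyGet? matriz (0 : Int)).getD "").toList.length
  (PySem.List.pyRange 1 (filas : Int) 1).foldl
    (fun contador i => if scanDiag matriz columnas filas 0 i.toNat none 0 then contador + 1 else contador) 0

-- ===== PRECONDITION & SPEC =====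
-- Pre_ excludes exactly the inputs where Python A raises IndexError: the empty matrix
-- (len(matriz[0])) and ragged matrices some accessed diagonal cell of which falls past
-- the end of its (shorter-than-row-0) row.
def Pre_diagonales_inferiores (matriz : List String) : Prop :=
  matriz ≠ [] ∧ ∀ k < matriz.length, 1 ≤ k →
    min k ((matriz.getD 0 "").toList.length) ≤ (matriz.getD k "").toList.length
instance (matriz : List String) : Decidable (Pre_diagonales_inferiores matriz) := by
  unfold Pre_diagonales_inferiores; infer_instance

def pvWitness_diagonales_inferiores : List String := ["ATCG", "TTTT", "ACGT", "GGCA"]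

def Spec_diagonales_inferiores (matriz : List String) (out : Int) : Prop := out = diagonales_inferiores_alt matriz
instance (matriz : List String) (out : Int) : Decidable (Spec_diagonales_inferiores matriz out) := by unfold Spec_diagonales_inferiores; infer_instance

-- ===== CLAIM (what is proved, stated in full; the proofs are below) =====
def Claim_equal_diagonales_inferiores : Prop := ∀ (matriz : List String), Dom_diagonales_inferiores matriz → Pre_diagonales_inferiores matriz → Spec_diagonales_inferiores matriz (diagonales_inferiores matriz)

-- ===== LEMMAS AND PROOFS =====

-- the sequence of cells of one lower diagonal (proof-side abstraction of both loops)
def pvCells (matriz : List String) (columnas filas : Nat) (j k : Nat) : List Char :=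
  if j < columnas ∧ k < filas then
    pvCell matriz k j :: pvCells matriz columnas filas (j + 1) (k + 1)
  else []
termination_by columnas - j

-- pure version of B's scan
def pvGo : List Char → Option Char → Nat → Bool
  | [], _, _ => false
  | c :: rest, prev, run =>
    let run' := if some c = prev then run + 1 else 1
    if run' = 4 ∧ c ∈ (['A', 'T', 'C', 'G'] : List Char) then true
    else pvGo rest (some c) run'

def pvHasQuad (l : List Char) : Prop :=
  ∃ c, c ∈ (['A', 'T', 'C', 'G'] : List Char) ∧ List.replicate 4 c <:+: l

lemma buildDiag_eq (matriz : List String) (columnas filas : Nat) :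
    ∀ n j k acc, columnas - j ≤ n →
      buildDiag matriz columnas filas j k acc = acc ++ pvCells matriz columnas filas j k := by
  intro n
  induction n with
  | zero =>
    intro j k acc h
    rw [buildDiag, pvCells]
    have hnc : ¬ (j < columnas ∧ k < filas) := by omega
    simp [hnc]
  | succ n ih =>
    intro j k acc h
    rw [buildDiag, pvCells]
    by_cases hc : j < columnas ∧ k < filas
    · simp only [if_pos hc]
      rw [ih _ _ _ (by omega)]
      simp
    · simp [hc]

lemma scanDiag_eq_go (matriz : List String) (columnas filas : Nat) :
    ∀ n j k prev run, columnas - j ≤ n →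
      scanDiag matriz columnas filas j k prev run = pvGo (pvCells matriz columnas filas j k) prev run := by
  intro n
  induction n with
  | zero =>
    intro j k prev run h
    rw [scanDiag, pvCells]
    have hnc : ¬ (j < columnas ∧ k < filas) := by omega
    simp [hnc, pvGo]
  | succ n ih =>
    intro j k prev run h
    rw [scanDiag, pvCells]
    by_cases hc : j < columnas ∧ k < filas
    · simp only [if_pos hc, pvGo]
      rw [ih _ _ _ _ (by omega)]
    · simp [hc, pvGo]

lemma pvGo_iff : ∀ (l : List Char) (prev : Option Char) (run : Nat),
    (∀ p, prev = some p → p ∈ (['A', 'T', 'C', 'G'] : List Char) → run ≤ 3) →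
    (pvGo l prev run = true ↔ pvHasQuad l ∨
      ∃ p m, prev = some p ∧ p ∈ (['A', 'T', 'C', 'G'] : List Char) ∧
        1 ≤ m ∧ 4 ≤ m + run ∧ List.replicate m p <+: l) := by
  intro l
  induction l with
  | nil =>
    intro prev run _
    constructor
    · intro h; simp [pvGo] at h
    · rintro (⟨d, hd, hinf⟩ | ⟨p, m, hp, hpin, hm, hrun, hpre⟩)
      · rw [List.infix_nil] at hinf
        have h4 := congrArg List.length hinf
        simp at h4
      · rw [List.prefix_nil] at hpre
        have h0 := congrArg List.length hpre
        simp at h0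
        omega
  | cons c rest ih =>
    intro prev run H
    simp only [pvGo]
    by_cases hf : (if some c = prev then run + 1 else 1) = 4 ∧ c ∈ (['A', 'T', 'C', 'G'] : List Char)
    · simp only [if_pos hf, true_iff]
      obtain ⟨h4, hdna⟩ := hf
      have hps : some c = prev := by
        by_contra hne
        rw [if_neg hne] at h4
        omega
      have hrun : run = 3 := by rw [if_pos hps] at h4; omega
      refine Or.inr ⟨c, 1, hps.symm, hdna, le_refl 1, by omega, ?_⟩
      exact List.cons_prefix_cons.mpr ⟨rfl, List.nil_prefix⟩
    · simp only [if_neg hf]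
      have hr1 : 1 ≤ (if some c = prev then run + 1 else 1) := by split <;> omega
      have hinv : ∀ p, some c = some p → p ∈ (['A', 'T', 'C', 'G'] : List Char) →
          (if some c = prev then run + 1 else 1) ≤ 3 := by
        intro p hp hpin
        injection hp with hp; subst hp
        have hne4 : (if some c = prev then run + 1 else 1) ≠ 4 := fun h => hf ⟨h, hpin⟩
        by_cases hps : some c = prev
        · have h3 := H c hps.symm hpin
          rw [if_pos hps] at hne4 ⊢; omega
        · rw [if_neg hps] at hne4 ⊢; omega
      rw [ih (some c) _ hinv]
      constructor
      · rintro (⟨d, hd, hinf⟩ | ⟨p, m, hp, hpin, hm, hrun, hpre⟩)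
        · exact Or.inl ⟨d, hd, List.infix_cons hinf⟩
        · injection hp with hp; subst hp
          by_cases hps : some c = prev
          · rw [if_pos hps] at hrun
            exact Or.inr ⟨c, m + 1, hps.symm, hpin, by omega, by omega, by
              rw [List.replicate_succ]; exact List.cons_prefix_cons.mpr ⟨rfl, hpre⟩⟩
          · rw [if_neg hps] at hrun
            refine Or.inl ⟨c, hpin, ?_⟩
            have hpre' : List.replicate (m + 1) c <+: c :: rest := by
              rw [List.replicate_succ]; exact List.cons_prefix_cons.mpr ⟨rfl, hpre⟩
            have hsub : List.replicate 4 c <+: List.replicate (m + 1) c :=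
              ⟨List.replicate (m + 1 - 4) c, by rw [← List.replicate_add]; congr 1; omega⟩
            exact (hsub.trans hpre').isInfix
      · rintro (⟨d, hd, hinf⟩ | ⟨p, m, hp, hpin, hm, hrun, hpre⟩)
        · rcases List.infix_cons_iff.mp hinf with hpre | hinf'
          · rw [show (4 : Nat) = 3 + 1 from rfl, Nat.add_comm, List.replicate_succ] at hpre
            obtain ⟨hdc, hpre'⟩ := List.cons_prefix_cons.mp hpre
            subst hdc
            exact Or.inr ⟨d, 3, rfl, hd, by omega, by omega, hpre'⟩
          · exact Or.inl ⟨d, hd, hinf'⟩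
        · obtain ⟨m', rfl⟩ : ∃ m', m = m' + 1 := ⟨m - 1, by omega⟩
          rw [List.replicate_succ] at hpre
          obtain ⟨hpc, hpre'⟩ := List.cons_prefix_cons.mp hpre
          subst hpc
          have hps : some p = prev := hp.symm
          rw [if_pos hps] at hr1 hinv ⊢
          by_cases hm' : m' = 0
          · exfalso
            have h3 := H p hp hpin
            exact hf ⟨by rw [if_pos hps]; omega, hpin⟩
          · exact Or.inr ⟨p, m', rfl, hpin, by omega, by omega, hpre'⟩

lemma key_iff (matriz : List String) (columnas filas : Nat) (k : Nat) :
    (PySem.Str.find (String.ofList (buildDiag matriz columnas filas 0 k [])) "TTTT" ≠ -1 ∨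
     PySem.Str.find (String.ofList (buildDiag matriz columnas filas 0 k [])) "AAAA" ≠ -1 ∨
     PySem.Str.find (String.ofList (buildDiag matriz columnas filas 0 k [])) "CCCC" ≠ -1 ∨
     PySem.Str.find (String.ofList (buildDiag matriz columnas filas 0 k [])) "GGGG" ≠ -1) ↔
    scanDiag matriz columnas filas 0 k none 0 = true := by
  have eT : "TTTT".toList = List.replicate 4 'T' := by decide
  have eA : "AAAA".toList = List.replicate 4 'A' := by decide
  have eC : "CCCC".toList = List.replicate 4 'C' := by decide
  have eG : "GGGG".toList = List.replicate 4 'G' := by decide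
  rw [scanDiag_eq_go matriz columnas filas columnas 0 k none 0 (by omega),
      buildDiag_eq matriz columnas filas columnas 0 k [] (by omega), List.nil_append]
  rw [pvGo_iff _ none 0 (by intro p h; exact absurd h (by simp))]
  simp only [PySem.Str.find_ne_neg_one_iff, String.toList_ofList, eT, eA, eC, eG, pvHasQuad]
  constructor
  · rintro (h | h | h | h)
    exacts [Or.inl ⟨'T', by decide, h⟩, Or.inl ⟨'A', by decide, h⟩,
            Or.inl ⟨'C', by decide, h⟩, Or.inl ⟨'G', by decide, h⟩]
  · rintro (⟨d, hd, hinf⟩ | ⟨p, m, hp, _⟩)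
    · simp only [List.mem_cons, List.not_mem_nil, or_false] at hd
      rcases hd with rfl | rfl | rfl | rfl
      exacts [Or.inr (Or.inl hinf), Or.inl hinf,
              Or.inr (Or.inr (Or.inl hinf)), Or.inr (Or.inr (Or.inr hinf))]
    · exact absurd hp (by simp)

lemma fold_eq (matriz : List String) (columnas filas : Nat) (r : List Int) :
    checar_horizontal (r.foldl (fun ds i => ds ++ [String.ofList (buildDiag matriz columnas filas 0 i.toNat [])]) []) =
    r.foldl (fun contador i => if scanDiag matriz columnas filas 0 i.toNat none 0 then contador + 1 else contador) 0 := by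
  rw [PySem.List.foldl_append_singleton_eq_map, List.nil_append]
  unfold checar_horizontal
  rw [List.foldl_map]
  congr 1
  funext acc i
  by_cases h : scanDiag matriz columnas filas 0 i.toNat none 0 = true
  · rw [if_pos ((key_iff matriz columnas filas i.toNat).mpr h), if_pos h]
  · rw [if_neg (fun hc => h ((key_iff matriz columnas filas i.toNat).mp hc)), if_neg h]

-- ===== VERDICT (by name: the statement is the Claim_ definition above) =====
theorem diagonales_inferiores_spec : Claim_equal_diagonales_inferiores := by
  intro matriz _ _
  show diagonales_inferiores matriz = diagonales_inferiores_alt matriz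
  unfold diagonales_inferiores diagonales_inferiores_alt
  exact fold_eq matriz _ _ _
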